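-- pv_equiv track=rewrite | github.com/nandkishorrathodk-art/Ironcliw-ai | backend/vision/macos_space_detector.py | _group_windows_by_application
-- ===== SOURCE A (Python) =====
-- from typing import Dict, List, Any, Optional, Tuple
--
-- def _group_windows_by_application(windows: List[Dict]) -> Dict[str, List[Dict]]:
--     """Group windows by their application"""
--     app_groups = {}
--
--     for window in windows:
--         app_name = window.get('kCGWindowOwnerName', 'Unknown')
--         if app_name not in app_groups:
--             app_groups[app_name] = []
--         app_groups[app_name].append(window)
--
--     return app_groups
-- ===== SOURCE B (Python) =====
-- def _group_windows_by_application(windows):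
--     """Group windows by their application (two-pass: dedup keys, then filter per key)"""
--     key = lambda w: w.get('kCGWindowOwnerName', 'Unknown')
--     keys = list(dict.fromkeys(key(w) for w in windows))
--     return {k: [w for w in windows if key(w) == k] for k in keys}
-- ===== Notes on version B (the rewrite author's own statement) =====
-- stated objective: alternative
-- what changed: Replaces the single-pass mutable bucketing loop (membership test + append per window) by a two-pass comprehension: first dedup the key sequence in first-occurrence order, then build each group with one filter per distinct key.
import Mathlib
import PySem

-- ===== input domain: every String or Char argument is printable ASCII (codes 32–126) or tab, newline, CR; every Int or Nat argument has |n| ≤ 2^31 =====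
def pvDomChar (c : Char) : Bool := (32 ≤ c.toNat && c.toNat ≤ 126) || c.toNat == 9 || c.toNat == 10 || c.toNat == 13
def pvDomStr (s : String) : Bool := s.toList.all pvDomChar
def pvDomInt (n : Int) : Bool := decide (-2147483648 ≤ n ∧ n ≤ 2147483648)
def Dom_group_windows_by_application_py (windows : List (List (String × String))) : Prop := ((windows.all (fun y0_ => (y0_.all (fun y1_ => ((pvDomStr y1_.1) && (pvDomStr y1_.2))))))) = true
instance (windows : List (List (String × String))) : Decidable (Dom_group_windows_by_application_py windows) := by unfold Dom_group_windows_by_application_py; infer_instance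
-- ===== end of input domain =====

-- B replaces A's single-pass mutable bucketing loop by a two-pass form (dedup the keys in
-- first-occurrence order, then one filter per distinct key); same result, alternative structure.

-- shared key extraction: window.get('kCGWindowOwnerName', 'Unknown')
def pvWinApp (window : List (String × String)) : String :=
  (PySem.Dict.mk window).getD "kCGWindowOwnerName" "Unknown"

-- ===== PORT A =====
def group_windows_by_application_py (windows : List (List (String × String))) : List (String × List (List (String × String))) :=
  (windows.foldl (fun appGroups window =>
      let appName := pvWinApp window
      let appGroups := if appGroups.contains appName then appGroups
                       else appGroups.insert appName []
      appGroups.modify appName [] (fun l => l ++ [window]))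
    PySem.Dict.empty).items

-- ===== PORT B =====
def group_windows_by_application_py_alt (windows : List (List (String × String))) : List (String × List (List (String × String))) :=
  (PySem.List.dedup (windows.map pvWinApp)).map
    (fun k => (k, windows.filter (fun w => pvWinApp w == k)))

-- ===== PRECONDITION & SPEC =====
def Spec_group_windows_by_application_py (windows : List (List (String × String))) (out : List (String × List (List (String × String)))) : Prop := out = group_windows_by_application_py_alt windows
instance (windows : List (List (String × String))) (out : List (String × List (List (String × String)))) : Decidable (Spec_group_windows_by_application_py windows out) := by unfold Spec_group_windows_by_application_py; infer_instance

-- ===== CLAIM (what is proved, stated in full; the proofs are below) =====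
def Claim_equal_group_windows_by_application_py : Prop := ∀ (windows : List (List (String × String))), Dom_group_windows_by_application_py windows → Spec_group_windows_by_application_py windows (group_windows_by_application_py windows)

-- ===== LEMMAS AND PROOFS =====

-- A's guarded "ensure key, then append" step is one 'modify' step.
theorem pv_step_eq (g : PySem.Dict String (List (List (String × String))))
    (a : String) (w : List (String × String)) :
    (if g.contains a then g else g.insert a []).modify a [] (fun l => l ++ [w])
      = g.modify a [] (fun l => l ++ [w]) := by
  by_cases h : g.contains a = true
  · simp [h]
  · rw [if_neg h]
    rw [PySem.Dict.modify, PySem.Dict.modify, PySem.Dict.getD_insert_self,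
      PySem.Dict.insert_insert_self, List.nil_append,
      PySem.Dict.getD_of_not_contains g [] (by simpa using h), List.nil_append]

theorem pv_foldl_eq (windows : List (List (String × String))) :
    (windows.foldl (fun appGroups window =>
        let appName := pvWinApp window
        let appGroups := if appGroups.contains appName then appGroups
                         else appGroups.insert appName []
        appGroups.modify appName [] (fun l => l ++ [window]))
      PySem.Dict.empty)
    = windows.foldl (fun d w => d.modify (pvWinApp w) [] (fun l => l ++ [w])) PySem.Dict.empty := by
  congr 1
  funext g w
  exact pv_step_eq g (pvWinApp w) w

theorem pv_filter_pairs (windows : List (List (String × String))) (k : String) :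
    List.map (fun x => x.2)
      (List.filter (fun p => p.1 == k) (windows.map (fun w => (pvWinApp w, w))))
      = windows.filter (fun w => pvWinApp w == k) := by
  simp [List.filter_map, List.map_map, Function.comp_def]

theorem group_windows_by_application_py_spec : Claim_equal_group_windows_by_application_py := by
  intro windows _
  show _ = _
  unfold group_windows_by_application_py group_windows_by_application_py_alt
  rw [pv_foldl_eq]
  set d := windows.foldl (fun d w => d.modify (pvWinApp w) [] (fun l => l ++ [w])) PySem.Dict.empty with hd
  have hnodup : d.keys.Nodup := by
    rw [hd]
    exact PySem.Dict.nodup_keys_foldl_modify_key windows pvWinApp []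
      (fun _ w l => l ++ [w]) PySem.Dict.empty (by simp [PySem.Dict.empty])
  have hkeys : d.keys = PySem.List.dedup (windows.map pvWinApp) := by
    rw [hd, PySem.Dict.keys_foldl_modify_key windows pvWinApp [] (fun _ w l => l ++ [w])]
    simp [PySem.Dict.empty, PySem.Set.update_nil_left, PySem.List.dedup_eq_ofList]
  have hgetD : ∀ k, d.getD k [] = windows.filter (fun w => pvWinApp w == k) := by
    intro k
    have : windows.foldl (fun d w => d.modify (pvWinApp w) [] (fun l => l ++ [w])) PySem.Dict.empty
        = (windows.map (fun w => (pvWinApp w, w))).foldl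
            (fun d p => d.modify p.1 [] (fun l => l ++ [p.2])) PySem.Dict.empty := by
      rw [List.foldl_map]
    rw [hd, this, PySem.Dict.getD_foldl_modify_append]
    simp [PySem.Dict.empty, PySem.Dict.getD, PySem.Dict.get?, pv_filter_pairs]
  rw [PySem.Dict.items_eq_map_keys d hnodup [], hkeys]
  refine List.map_congr_left ?_
  intro k _
  rw [hgetD]
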